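-- pv_equiv track=rewrite | github.com/rugved-mahamune/interview-practice | getrich.py | getRich
-- ===== SOURCE A (Python) =====
-- def getRich(initialEnergy, energy, coins):
--     # Write your code here
--     kv = dict(zip(coins, energy))
--     sum1 = 0
--     for i in range(len(energy)):
--         if(initialEnergy == 0):
--             initialEnergy += energy[i]
--         else:
--             sum1 += coins[i]
--     return sum1
-- ===== SOURCE B (Python) =====
-- def getRich(initialEnergy, energy, coins):
--     n = len(energy)
--     if initialEnergy != 0:
--         start = 0
--     else:
--         # A's running energy, while it is zero, always equals the energy entry just
--         # added, so it first turns nonzero right after the first nonzero energy element.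
--         start = n
--         for i, e in enumerate(energy):
--             if e != 0:
--                 start = i + 1
--                 break
--     return sum(coins[start:n])
-- ===== Notes on version B (the rewrite author's own statement) =====
-- stated objective: alternative
-- what changed: B does not simulate the running energy at all: using the fact that while the accumulator is zero it always equals the energy entry just added, B computes the activation point as one past the first nonzero energy element (early-exit search, no accumulator), then returns a single C-level slice sum sum(coins[start:n]); the dead kv dict disappears.
import Mathlib
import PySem

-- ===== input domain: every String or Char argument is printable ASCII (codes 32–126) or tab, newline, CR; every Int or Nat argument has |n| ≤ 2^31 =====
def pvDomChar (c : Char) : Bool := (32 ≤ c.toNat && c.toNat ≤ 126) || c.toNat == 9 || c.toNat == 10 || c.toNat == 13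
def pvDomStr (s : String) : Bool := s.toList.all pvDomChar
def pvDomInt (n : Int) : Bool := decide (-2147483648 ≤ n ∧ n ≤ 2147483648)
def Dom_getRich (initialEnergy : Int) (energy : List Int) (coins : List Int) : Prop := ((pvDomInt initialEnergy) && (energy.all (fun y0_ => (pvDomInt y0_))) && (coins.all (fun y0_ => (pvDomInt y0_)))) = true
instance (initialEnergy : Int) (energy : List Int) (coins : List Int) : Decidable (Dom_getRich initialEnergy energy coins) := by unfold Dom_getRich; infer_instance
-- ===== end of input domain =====

-- B drops the running-energy simulation: the activation point is one past the first nonzero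
-- energy element (early-exit search), then one slice sum of coins; objective: alternative.


-- ===== PORT A =====
-- A's for-loop over range(len(energy)) carrying (initialEnergy, sum1); coins[i] via pyGet?
-- (none = IndexError, excluded by Pre_). The dead `kv = dict(zip(coins, energy))` has no effect.
def getRichLoopA (energy coins : List Int) (i : Nat) (e s : Int) : Option Int :=
  if i < energy.length then
    if e == 0 then
      match PySem.List.pyGet? energy (i : Int) with
      | none => none
      | some v => getRichLoopA energy coins (i + 1) (e + v) s
    else
      match PySem.List.pyGet? coins (i : Int) with
      | none => none
      | some c => getRichLoopA energy coins (i + 1) e (s + c)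
  else some s
termination_by energy.length - i

def getRich (initialEnergy : Int) (energy : List Int) (coins : List Int) : Int :=
  (getRichLoopA energy coins 0 initialEnergy 0).getD 0

-- ===== PORT B =====
-- Source B's enumerate loop with break: first nonzero element of `energy` at index i gives i + 1,
-- otherwise the initial value `start` (= n) survives.
def getRichFindB : List Int → Nat → Nat → Nat
  | [], _, start => start
  | e :: rest, i, start => if e ≠ 0 then i + 1 else getRichFindB rest (i + 1) start

-- Source B: sum(coins[start:n]) — Python slice (clamped) then sum.
def getRich_alt (initialEnergy : Int) (energy : List Int) (coins : List Int) : Int :=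
  let n := energy.length
  let start := if initialEnergy ≠ 0 then 0 else getRichFindB energy 0 n
  (PySem.List.slice coins (some (start : Int)) (some (n : Int))).sum

-- ===== PRECONDITION & SPEC =====
-- Exactly the inputs on which Python A returns (no IndexError): either coins is long enough,
-- or the energy phase runs to the end (initialEnergy = 0 and all but the last energy entry are 0).
def Pre_getRich (initialEnergy : Int) (energy : List Int) (coins : List Int) : Prop :=
  energy.length ≤ coins.length ∨ (initialEnergy = 0 ∧ ∀ x ∈ energy.dropLast, x = 0)
instance (initialEnergy : Int) (energy : List Int) (coins : List Int) : Decidable (Pre_getRich initialEnergy energy coins) := by unfold Pre_getRich; infer_instance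

def pvWitness_getRich : Int × List Int × List Int := (1, [0, 2], [5, 7])

def Spec_getRich (initialEnergy : Int) (energy : List Int) (coins : List Int) (out : Int) : Prop := out = getRich_alt initialEnergy energy coins
instance (initialEnergy : Int) (energy : List Int) (coins : List Int) (out : Int) : Decidable (Spec_getRich initialEnergy energy coins out) := by unfold Spec_getRich; infer_instance

-- ===== CLAIM =====
def Claim_equal_getRich : Prop := ∀ (initialEnergy : Int) (energy : List Int) (coins : List Int), Dom_getRich initialEnergy energy coins → Pre_getRich initialEnergy energy coins → Spec_getRich initialEnergy energy coins (getRich initialEnergy energy coins)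

-- ===== LEMMAS AND PROOFS =====

theorem loopA_done (energy coins : List Int) (e s : Int) :
    getRichLoopA energy coins energy.length e s = some s := by
  unfold getRichLoopA; simp

-- active phase: once e ≠ 0, A sums coins[i:n]
theorem loopA_active (energy coins : List Int) :
    ∀ (k i : Nat) (s e : Int), energy.length - i ≤ k → i ≤ energy.length →
      energy.length ≤ coins.length → e ≠ 0 →
      getRichLoopA energy coins i e s =
        some (s + ((coins.drop i).take (energy.length - i)).sum) := by
  intro k
  induction k with
  | zero =>
    intro i s e hk hi hc he
    have h : i = energy.length := by omega
    subst h; simp [loopA_done]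
  | succ k ih =>
    intro i s e hk hi hc he
    by_cases h : i < energy.length
    · have hci : i < coins.length := by omega
      have hg : PySem.List.pyGet? coins (i : Int) = some coins[i] :=
        PySem.List.pyGet?_ofNat coins i hci
      rw [getRichLoopA]
      have heb : (e == 0) = false := by simp [he]
      simp only [h, if_true, heb, Bool.false_eq_true, if_false, hg]
      rw [ih (i + 1) (s + coins[i]) e (by omega) (by omega) hc he]
      congr 1
      have hdrop : coins.drop i = coins[i] :: coins.drop (i + 1) :=
        (List.getElem_cons_drop hci).symm
      have hn : energy.length - i = (energy.length - (i + 1)) + 1 := by omega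
      rw [hdrop, hn, List.take_succ_cons, List.sum_cons]; ring
    · have h' : i = energy.length := by omega
      subst h'; simp [loopA_done]

-- zero phase (coins long enough): A agrees with the first-nonzero activation point
theorem loopA_zero (energy coins : List Int) :
    ∀ (k i : Nat) (s : Int), energy.length - i ≤ k → i ≤ energy.length →
      energy.length ≤ coins.length →
      getRichLoopA energy coins i 0 s =
        some (s + ((coins.drop (getRichFindB (energy.drop i) i energy.length)).take
          (energy.length - getRichFindB (energy.drop i) i energy.length)).sum) := by
  intro k
  induction k with
  | zero =>
    intro i s hk hi hc
    have h : i = energy.length := by omega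
    subst h; simp [loopA_done, getRichFindB]
  | succ k ih =>
    intro i s hk hi hc
    by_cases h : i < energy.length
    · have hg : PySem.List.pyGet? energy (i : Int) = some energy[i] :=
        PySem.List.pyGet?_ofNat energy i h
      have hdropE : energy.drop i = energy[i] :: energy.drop (i + 1) :=
        (List.getElem_cons_drop h).symm
      rw [getRichLoopA]
      simp only [h, if_true, beq_self_eq_true, hg, zero_add, hdropE, getRichFindB]
      by_cases hz : energy[i] = 0
      · simp only [hz, ne_eq, not_true_eq_false, if_false]
        simpa [hz] using ih (i + 1) s (by omega) (by omega) hc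
      · simp only [ne_eq, hz, not_false_eq_true, if_true]
        exact loopA_active energy coins (energy.length - (i + 1)) (i + 1) s energy[i]
          (by omega) (by omega) hc hz
    · have h' : i = energy.length := by omega
      subst h'; simp [loopA_done, getRichFindB]

-- all-zero energy prefix: A never leaves the energy branch and returns s
theorem loopA_allzero (energy coins : List Int) :
    ∀ (k i : Nat) (s : Int), energy.length - i ≤ k →
      (∀ (j : Nat) (h : j < energy.length), j < energy.length - 1 → i ≤ j → energy[j] = 0) →
      getRichLoopA energy coins i 0 s = some s := by
  intro k
  induction k with
  | zero =>
    intro i s hk hz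
    unfold getRichLoopA
    have h : ¬ i < energy.length := by omega
    simp [h]
  | succ k ih =>
    intro i s hk hz
    by_cases h : i < energy.length
    · have hg : PySem.List.pyGet? energy (i : Int) = some energy[i] :=
        PySem.List.pyGet?_ofNat energy i h
      rw [getRichLoopA]
      simp only [h, if_true, beq_self_eq_true, hg, zero_add]
      by_cases hl : i < energy.length - 1
      · have : energy[i] = 0 := hz i h hl le_rfl
        rw [this]
        exact ih (i + 1) s (by omega) (fun j hj h1 h2 => hz j hj h1 (by omega))
      · have hlast : i + 1 = energy.length := by omega
        rw [getRichLoopA]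
        simp [hlast]
    · unfold getRichLoopA; simp [h]

theorem findB_all_zero (l : List Int) :
    ∀ (i d : Nat), (∀ (j : Nat) (h : j < l.length), j < l.length - 1 → l[j] = 0) →
      i + l.length = d → getRichFindB l i d = d := by
  induction l with
  | nil => intro i d _ _; rfl
  | cons e rest ih =>
    intro i d hz hd
    by_cases he : e ≠ 0
    · have hr : rest.length = 0 := by
        by_contra hne
        have h0 : (0 : Nat) < (e :: rest).length - 1 := by simp; omega
        have := hz 0 (by simp) (by simpa using h0)
        simp at this; exact he this
      simp only [getRichFindB]
      rw [if_pos he]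
      simp at hd; omega
    · simp only [getRichFindB, he, if_false]
      apply ih (i + 1) d
      · intro j hj hlt
        have := hz (j + 1) (by simpa using Nat.succ_lt_succ hj) (by simp at hlt ⊢; omega)
        simpa using this
      · simp at hd; omega

-- ===== VERDICT =====
theorem getRich_spec : Claim_equal_getRich := by
  intro ie energy coins _ hpre
  unfold Spec_getRich getRich getRich_alt
  by_cases hc : energy.length ≤ coins.length
  · by_cases hie : ie = 0
    · subst hie
      rw [loopA_zero energy coins energy.length 0 0 (by omega) (by omega) hc]
      simp [PySem.List.slice_natCast]
    · rw [loopA_active energy coins energy.length 0 0 ie (by omega) (by omega) hc hie]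
      simp [hie]
  · rcases hpre with h | ⟨hie, hz⟩
    · omega
    · subst hie
      have hz' : ∀ (j : Nat) (h : j < energy.length), j < energy.length - 1 → energy[j] = 0 := by
        intro j hj hlt
        have hjd : j < energy.dropLast.length := by simp; omega
        have := hz energy.dropLast[j] (List.getElem_mem hjd)
        simpa [List.getElem_dropLast] using this
      rw [loopA_allzero energy coins energy.length 0 0 (by omega) (fun j hj h1 _ => hz' j hj h1)]
      simp [findB_all_zero energy 0 energy.length hz' (by omega), PySem.List.slice_natCast]
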